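-- pv_equiv track=rewrite | github.com/sschott20/poe2fuzzymarket | src/poe2market/api.py | resolve_stat
-- ===== SOURCE A (Python) =====
-- def find_stats(query: str, stats_data: list[dict]) -> list[tuple[str, str]]:
--     """Search available stats by text. Returns [(stat_id, display_text), ...]."""
--     q = query.lower()
--     matches: list[tuple[str, str]] = []
--     for category in stats_data:
--         for entry in category.get("entries", []):
--             if q in entry["text"].lower():
--                 matches.append((entry["id"], entry["text"]))
--     return matches
--
-- def resolve_stat(
--     query: str, stats_data: list[dict], prefer_pseudo: bool = True
-- ) -> tuple[str, str] | None:
--     """Resolve a user-friendly stat name to a (stat_id, text) pair.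
--
--     Prefers pseudo stats over explicit when ambiguous, since pseudo stats
--     aggregate across mod sources.
--     """
--     matches = find_stats(query, stats_data)
--     if not matches:
--         return None
--     if len(matches) == 1:
--         return matches[0]
--
--     # Prefer exact-ish match
--     exact = [m for m in matches if m[1].lower().strip("# +-%.") == query.lower()]
--     if len(exact) == 1:
--         return exact[0]
--
--     if prefer_pseudo:
--         pseudo = [m for m in matches if m[0].startswith("pseudo.")]
--         if pseudo:
--             return pseudo[0]
--
--     return matches[0]
-- ===== SOURCE B (Python) =====
-- def resolve_stat(
--     query: str, stats_data: list[dict], prefer_pseudo: bool = True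
-- ) -> tuple[str, str] | None:
--     """Single fused pass: count matches and remember the first match, the
--     first exact-ish match (with its count) and the first pseudo match,
--     then decide from those five pieces of state."""
--     q = query.lower()
--     count = 0
--     first = None
--     exact_count = 0
--     exact_first = None
--     pseudo_first = None
--     for category in stats_data:
--         for entry in category.get("entries", []):
--             text = entry["text"]
--             if q in text.lower():
--                 sid = entry["id"]
--                 m = (sid, text)
--                 count += 1
--                 if first is None:
--                     first = m
--                 if text.lower().strip("# +-%.") == q:
--                     exact_count += 1
--                     if exact_first is None:
--                         exact_first = m
--                 if pseudo_first is None and sid.startswith("pseudo."):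
--                     pseudo_first = m
--     if count == 0:
--         return None
--     if count == 1:
--         return first
--     if exact_count == 1:
--         return exact_first
--     if prefer_pseudo and pseudo_first is not None:
--         return pseudo_first
--     return first
-- ===== Notes on version B (the rewrite author's own statement) =====
-- stated objective: alternative
-- what changed: Fuses find_stats and the two subsequent filter passes into one loop over categories/entries that maintains a match counter, first match, exact-match counter/first and first pseudo match, deciding from that state afterwards instead of materialising and re-filtering the match list.
import Mathlib
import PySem

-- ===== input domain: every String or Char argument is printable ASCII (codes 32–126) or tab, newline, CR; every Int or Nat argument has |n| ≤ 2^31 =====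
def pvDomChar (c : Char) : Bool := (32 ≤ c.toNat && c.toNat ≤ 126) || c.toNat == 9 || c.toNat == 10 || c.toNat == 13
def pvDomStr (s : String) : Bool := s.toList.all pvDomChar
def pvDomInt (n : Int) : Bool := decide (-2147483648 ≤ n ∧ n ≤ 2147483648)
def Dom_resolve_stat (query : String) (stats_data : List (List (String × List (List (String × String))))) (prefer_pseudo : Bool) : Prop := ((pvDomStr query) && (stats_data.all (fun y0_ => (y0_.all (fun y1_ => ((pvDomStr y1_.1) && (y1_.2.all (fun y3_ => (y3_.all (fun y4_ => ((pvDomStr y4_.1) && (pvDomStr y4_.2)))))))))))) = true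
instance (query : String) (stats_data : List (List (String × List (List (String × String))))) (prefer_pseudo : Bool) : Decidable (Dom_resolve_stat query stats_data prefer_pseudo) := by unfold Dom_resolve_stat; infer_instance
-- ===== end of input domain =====

-- B replaces A's build-then-refilter passes by one fused scan keeping (count, first, exact count/first, first pseudo); same cost class, O(1) extra space.

-- ===== PORT A =====
-- shared per-entry primitives (the same Python expressions occur in both programs)
-- d.get(k, dflt) / d[k] on an association list (first match; d[k] is exact under Pre_, which guarantees the key is present)
def pvGetD {α : Type} (d : List (String × α)) (k : String) (dflt : α) : α := (d.lookup k).getD dflt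
-- q in entry["text"].lower()
def pvIsMatch (q : String) (entry : List (String × String)) : Bool :=
  PySem.Str.isIn q (PySem.Str.lower (pvGetD entry "text" ""))
-- (entry["id"], entry["text"])
def pvEntry (entry : List (String × String)) : String × String :=
  (pvGetD entry "id" "", pvGetD entry "text" "")
-- m[1].lower().strip("# +-%.") == q
def pvExact (q : String) (m : String × String) : Bool :=
  PySem.Str.stripChars (PySem.Str.lower m.2) "# +-%." == q
-- m[0].startswith("pseudo.")
def pvPseudo (m : String × String) : Bool := PySem.Str.startswith m.1 "pseudo."

def find_stats (query : String) (stats_data : List (List (String × List (List (String × String))))) : List (String × String) :=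
  let q := PySem.Str.lower query
  stats_data.foldl (fun ms cat =>
    (pvGetD cat "entries" []).foldl (fun ms e =>
      if pvIsMatch q e then ms ++ [pvEntry e] else ms) ms) []

def resolve_stat (query : String) (stats_data : List (List (String × List (List (String × String))))) (prefer_pseudo : Bool) : Option (String × String) :=
  let ms := find_stats query stats_data
  if ms.isEmpty then none
  else if ms.length == 1 then ms.head?
  else
    let exact := ms.filter (pvExact (PySem.Str.lower query))
    if exact.length == 1 then exact.head?
    else if prefer_pseudo then
      let pseudo := ms.filter pvPseudo
      if !pseudo.isEmpty then pseudo.head? else ms.head?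
    else ms.head?

-- ===== PORT B =====
-- B's loop state: (count, first, exact_count, exact_first, pseudo_first)
def pvState : Type := Nat × Option (String × String) × Nat × Option (String × String) × Option (String × String)

-- the body of B's inner loop, for one entry
def bEntryStep (q : String) (s : pvState) (entry : List (String × String)) : pvState :=
  let text := pvGetD entry "text" ""
  if PySem.Str.isIn q (PySem.Str.lower text) then
    let sid := pvGetD entry "id" ""
    let m := (sid, text)
    let count := s.1 + 1
    let first := match s.2.1 with | none => some m | some x => some x
    let ec := if PySem.Str.stripChars (PySem.Str.lower text) "# +-%." == q then s.2.2.1 + 1 else s.2.2.1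
    let ef := if PySem.Str.stripChars (PySem.Str.lower text) "# +-%." == q then
                (match s.2.2.2.1 with | none => some m | some x => some x) else s.2.2.2.1
    let pf := match s.2.2.2.2 with
              | none => if PySem.Str.startswith sid "pseudo." then some m else none
              | some x => some x
    (count, first, ec, ef, pf)
  else s

def resolve_stat_alt (query : String) (stats_data : List (List (String × List (List (String × String))))) (prefer_pseudo : Bool) : Option (String × String) :=
  let q := PySem.Str.lower query
  let s : pvState := stats_data.foldl (fun s cat =>
      (pvGetD cat "entries" []).foldl (bEntryStep q) s)
      ((0 : Nat), (none : Option (String × String)), (0 : Nat),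
       (none : Option (String × String)), (none : Option (String × String)))
  match s with
  | (count, first, ec, ef, pf) =>
    if count == 0 then none
    else if count == 1 then first
    else if ec == 1 then ef
    else if prefer_pseudo then (match pf with | some x => some x | none => first)
    else first

-- ===== PRECONDITION & SPEC =====
-- Pre_ excludes exactly the inputs on which A raises KeyError: an entry without a
-- "text" key, or a matching entry without an "id" key.
def Pre_resolve_stat (query : String) (stats_data : List (List (String × List (List (String × String))))) (prefer_pseudo : Bool) : Prop :=
  ∀ cat ∈ stats_data, ∀ entry ∈ ((cat.lookup "entries").getD []),
    ((entry.lookup "text").isSome = true) ∧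
    (PySem.Str.isIn (PySem.Str.lower query)
        (PySem.Str.lower ((entry.lookup "text").getD "")) = true →
      (entry.lookup "id").isSome = true)
instance (query : String) (stats_data : List (List (String × List (List (String × String))))) (prefer_pseudo : Bool) : Decidable (Pre_resolve_stat query stats_data prefer_pseudo) := by unfold Pre_resolve_stat; infer_instance

def pvWitness_resolve_stat : String × (List (List (String × List (List (String × String))))) × Bool :=
  ("life", [[("entries", [[("id", "pseudo.total_life"), ("text", "+# total maximum Life")]])]], true)

def Spec_resolve_stat (query : String) (stats_data : List (List (String × List (List (String × String))))) (prefer_pseudo : Bool) (out : Option (String × String)) : Prop := out = resolve_stat_alt query stats_data prefer_pseudo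
instance (query : String) (stats_data : List (List (String × List (List (String × String))))) (prefer_pseudo : Bool) (out : Option (String × String)) : Decidable (Spec_resolve_stat query stats_data prefer_pseudo out) := by unfold Spec_resolve_stat; infer_instance

-- ===== CLAIM (what is proved, stated in full; the proofs are below) =====
def Claim_equal_resolve_stat : Prop := ∀ (query : String) (stats_data : List (List (String × List (List (String × String))))) (prefer_pseudo : Bool), Dom_resolve_stat query stats_data prefer_pseudo → Pre_resolve_stat query stats_data prefer_pseudo → Spec_resolve_stat query stats_data prefer_pseudo (resolve_stat query stats_data prefer_pseudo)

-- ===== LEMMAS AND PROOFS =====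

-- the state B's loop maintains, expressed from A's match list
def stateOf (q : String) (ms : List (String × String)) : pvState :=
  (ms.length, ms.head?, (ms.filter (pvExact q)).length,
   (ms.filter (pvExact q)).head?, (ms.filter pvPseudo).head?)

theorem pv_head?_append {α : Type} (ms : List α) (m : α) :
    (ms ++ [m]).head? = (match ms.head? with | none => some m | some x => some x) := by
  cases ms <;> rfl

theorem pv_filter_len_append {α : Type} (p : α → Bool) (ms : List α) (m : α) :
    ((ms ++ [m]).filter p).length
      = (if p m = true then (ms.filter p).length + 1 else (ms.filter p).length) := by
  by_cases hp : p m = true <;> simp [List.filter_append, hp]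

theorem pv_filter_head?_append {α : Type} (p : α → Bool) (ms : List α) (m : α) :
    ((ms ++ [m]).filter p).head?
      = (if p m = true then
           (match (ms.filter p).head? with | none => some m | some x => some x)
         else (ms.filter p).head?) := by
  by_cases hp : p m = true
  · rw [if_pos hp, List.filter_append, ← pv_head?_append]
    simp [hp]
  · have hp' : p m = false := by simpa using hp
    rw [if_neg hp, List.filter_append]
    simp [hp']

theorem pv_filter_head?_append' {α : Type} (p : α → Bool) (ms : List α) (m : α) :
    ((ms ++ [m]).filter p).head?
      = (match (ms.filter p).head? with
         | none => (if p m = true then some m else none)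
         | some x => some x) := by
  rw [List.filter_append]
  cases hh : (ms.filter p).head? with
  | none =>
    have hnil : ms.filter p = [] := by simpa [List.head?_eq_none_iff] using hh
    rw [hnil]
    by_cases hp : p m = true <;> simp [hp]
  | some x =>
    cases hmsf : ms.filter p with
    | nil => rw [hmsf] at hh; simp at hh
    | cons a t =>
      rw [hmsf] at hh
      simp at hh
      simp [hh]

theorem bEntryStep_stateOf (q : String) (ms : List (String × String))
    (e : List (String × String)) :
    bEntryStep q (stateOf q ms) e
      = stateOf q (if pvIsMatch q e then ms ++ [pvEntry e] else ms) := by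
  have hm : pvExact q (pvEntry e)
      = (PySem.Str.stripChars (PySem.Str.lower (pvGetD e "text" "")) "# +-%." == q) := by
    simp [pvExact, pvEntry]
  have hp : pvPseudo (pvEntry e)
      = PySem.Str.startswith (pvGetD e "id" "") "pseudo." := by
    simp [pvPseudo, pvEntry]
  by_cases h : pvIsMatch q e = true
  · unfold bEntryStep stateOf pvIsMatch
    unfold pvIsMatch at h
    rw [if_pos h, if_pos h]
    have hmm : ((pvGetD e "id" "", pvGetD e "text" "") : String × String) = pvEntry e := rfl
    simp only [hmm, ← hm, ← hp]
    rw [pv_head?_append ms (pvEntry e),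
        pv_filter_len_append (pvExact q) ms (pvEntry e),
        pv_filter_head?_append (pvExact q) ms (pvEntry e),
        pv_filter_head?_append' pvPseudo ms (pvEntry e)]
    have hlap : (ms ++ [pvEntry e]).length = ms.length + 1 := by simp
    rw [hlap]
    cases ms.head? <;> cases (List.filter (pvExact q) ms).head? <;>
      cases (List.filter pvPseudo ms).head? <;> rfl
  · rw [Bool.not_eq_true] at h
    unfold bEntryStep stateOf pvIsMatch
    unfold pvIsMatch at h
    rw [if_neg (by simpa using h), if_neg (by simpa using h)]

theorem foldl_entries_stateOf (q : String) (es : List (List (String × String)))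
    (ms : List (String × String)) :
    es.foldl (bEntryStep q) (stateOf q ms)
      = stateOf q (es.foldl (fun ms e => if pvIsMatch q e then ms ++ [pvEntry e] else ms) ms) := by
  induction es generalizing ms with
  | nil => rfl
  | cons e es ih => simp only [List.foldl_cons, bEntryStep_stateOf]; exact ih _

theorem foldl_cats_stateOf (q : String)
    (cats : List (List (String × List (List (String × String)))))
    (ms : List (String × String)) :
    cats.foldl (fun s cat => (pvGetD cat "entries" []).foldl (bEntryStep q) s) (stateOf q ms)
      = stateOf q (cats.foldl (fun ms cat =>
          (pvGetD cat "entries" []).foldl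
            (fun ms e => if pvIsMatch q e then ms ++ [pvEntry e] else ms) ms) ms) := by
  induction cats generalizing ms with
  | nil => rfl
  | cons c cs ih => simp only [List.foldl_cons, foldl_entries_stateOf]; exact ih _

theorem resolve_stat_eq_alt (query : String)
    (stats_data : List (List (String × List (List (String × String)))))
    (prefer_pseudo : Bool) :
    resolve_stat query stats_data prefer_pseudo
      = resolve_stat_alt query stats_data prefer_pseudo := by
  have hstate : stats_data.foldl
      (fun s cat => (pvGetD cat "entries" []).foldl (bEntryStep (PySem.Str.lower query)) s)
      ((0 : Nat), (none : Option (String × String)), (0 : Nat),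
       (none : Option (String × String)), (none : Option (String × String)))
      = stateOf (PySem.Str.lower query) (find_stats query stats_data) := by
    have h0 : ((0 : Nat), (none : Option (String × String)), (0 : Nat),
        (none : Option (String × String)), (none : Option (String × String)))
        = stateOf (PySem.Str.lower query) [] := rfl
    rw [h0, foldl_cats_stateOf]
    rfl
  simp only [resolve_stat, resolve_stat_alt]
  rw [hstate]
  simp only [stateOf]
  generalize find_stats query stats_data = ms
  cases ms with
  | nil => simp
  | cons m₁ tl =>
  cases tl with
  | nil => simp
  | cons m₂ rest =>
    simp only [List.isEmpty_cons, List.length_cons, Bool.false_eq_true, if_false]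
    have hlen1 : ((rest.length + 1 + 1 : Nat) == 1) = false := by simp
    have hlen0 : ((rest.length + 1 + 1 : Nat) == 0) = false := by simp
    simp only [hlen0, hlen1]
    simp only [Bool.false_eq_true, if_false]
    by_cases hec : (((m₁ :: m₂ :: rest).filter (pvExact (PySem.Str.lower query))).length == 1) = true
    · simp only [if_pos hec]
    · simp only [if_neg hec]
      cases prefer_pseudo with
      | false => rfl
      | true =>
        cases hps : (m₁ :: m₂ :: rest).filter pvPseudo with
        | nil => rfl
        | cons p ps => rfl

-- ===== VERDICT (by name: the statement is the Claim_ definition above) =====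
theorem resolve_stat_spec : Claim_equal_resolve_stat := by
  intro query stats_data prefer_pseudo _ _
  unfold Spec_resolve_stat
  exact resolve_stat_eq_alt query stats_data prefer_pseudo
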